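-- pv_equiv track=rewrite | github.com/Moaz1511/AFS | Automated Preparation Book (CQ)/preparation_book_converter_CQ.py | strip_suffix_from_parts
-- ===== SOURCE A (Python) =====
-- def strip_suffix_from_parts(parts, suffix_text):
--     """
--     Strips a suffix string from a list of text/omml parts, even if the
--     suffix is split across multiple runs.
--     """
--     if not parts or not suffix_text:
--         return parts
--
--     # Reconstruct only the text to check for the suffix
--     full_text = "".join(p_value for p_type, p_value in parts if p_type == "text")
--
--     # Check if the text actually ends with the suffix
--     if not full_text.rstrip().endswith(suffix_text.strip()):
--         return parts
--
--     chars_to_remove = len(suffix_text.strip())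
--     new_parts = []
--
--     # Iterate backwards through the parts to remove the suffix from the end
--     for p_type, p_value in reversed(parts):
--         if chars_to_remove > 0 and p_type == "text":
--             # Remove trailing spaces for accurate length check
--             val_stripped = p_value.rstrip()
--             if len(val_stripped) >= chars_to_remove:
--                 # The rest of the suffix is in this part. Slice it off.
--                 new_value = p_value[:-chars_to_remove]
--                 if new_value:  # Don't add an empty part
--                     new_parts.append((p_type, new_value))
--                 chars_to_remove = 0
--             else:
--                 # This part is completely consumed by the suffix. Skip it.
--                 chars_to_remove -= len(val_stripped)
--         else:
--             new_parts.append((p_type, p_value))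
--
--     # Reverse the list back to the correct order and return
--     return new_parts[::-1]
-- ===== SOURCE B (Python) =====
-- def _find_boundary(rev_parts, rem):
--     """Scan the reversed parts list, consuming `rem` suffix characters from
--     rstripped text parts; return (k, rem_at_k) for the first position k whose
--     rstripped length reaches rem (the boundary part), or None."""
--     if not rev_parts:
--         return None
--     (t, v), rest = rev_parts[0], rev_parts[1:]
--     if t == "text":
--         L = len(v.rstrip())
--         if L >= rem:
--             return 0, rem
--         res = _find_boundary(rest, rem - L)
--     else:
--         res = _find_boundary(rest, rem)
--     return None if res is None else (res[0] + 1, res[1])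
--
--
-- def strip_suffix_from_parts(parts, suffix_text):
--     if not parts or not suffix_text:
--         return parts
--     full_text = "".join(p_value for p_type, p_value in parts if p_type == "text")
--     target = suffix_text.strip()
--     if not full_text.rstrip().endswith(target):
--         return parts
--     rem = len(target)
--     if rem == 0:
--         return list(parts)
--     found = _find_boundary(parts[::-1], rem)
--     if found is None:
--         # suffix consumes every text part; non-text parts survive
--         return [p for p in parts if p[0] != "text"]
--     k, r = found
--     idx = len(parts) - 1 - k
--     head = parts[:idx]
--     t, v = parts[idx]
--     sliced = v[:-r]
--     mid = [(t, sliced)] if sliced else []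
--     tail_kept = [p for p in parts[idx + 1:] if p[0] != "text"]
--     return head + mid + tail_kept
-- ===== Notes on version B (the rewrite author's own statement) =====
-- stated objective: alternative
-- what changed: Replaces A's single backward pass that threads a (chars_to_remove, accumulator) state and reverses the result with a two-phase scheme: a recursive scan of the reversed list that only locates the boundary part and its residual count, followed by one forward rebuild from parts via take / slice / filter.
import Mathlib
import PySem

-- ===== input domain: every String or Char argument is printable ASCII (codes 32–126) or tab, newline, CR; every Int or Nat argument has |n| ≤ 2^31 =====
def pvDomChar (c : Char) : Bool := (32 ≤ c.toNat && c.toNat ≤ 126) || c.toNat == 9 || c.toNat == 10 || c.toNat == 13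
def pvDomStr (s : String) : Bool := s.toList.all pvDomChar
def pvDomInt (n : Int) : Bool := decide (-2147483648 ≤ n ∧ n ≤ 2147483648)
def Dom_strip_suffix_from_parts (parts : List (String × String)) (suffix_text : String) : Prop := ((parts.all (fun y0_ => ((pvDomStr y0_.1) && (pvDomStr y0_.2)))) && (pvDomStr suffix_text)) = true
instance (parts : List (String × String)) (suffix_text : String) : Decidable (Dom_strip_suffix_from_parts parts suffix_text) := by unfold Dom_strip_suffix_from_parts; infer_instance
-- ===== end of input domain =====

-- B rebuilds the list in two phases (locate the boundary part from the end, then one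
-- forward take/slice/filter) instead of A's single backward accumulator loop; objective: alternative.

-- ===== PORT A =====
-- A-side helper: the body of A's `for p_type, p_value in reversed(parts)` loop,
-- on state (chars_to_remove, new_parts); new_parts grows at the back, as in A.
def pvStepA (st : Int × List (String × String)) (p : String × String) : Int × List (String × String) :=
  if 0 < st.1 ∧ p.1 = "text" then
    let val_stripped := PySem.Str.rstrip p.2
    if st.1 ≤ PySem.Str.len val_stripped then
      -- new_value = p_value[:-chars_to_remove]; appended only if nonempty
      let new_value := PySem.Str.slice p.2 none (some (-st.1))
      ((0 : Int), if new_value ≠ "" then st.2 ++ [(p.1, new_value)] else st.2)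
    else (st.1 - PySem.Str.len val_stripped, st.2)
  else (st.1, st.2 ++ [p])

def strip_suffix_from_parts (parts : List (String × String)) (suffix_text : String) : List (String × String) :=
  if parts = [] ∨ suffix_text = "" then parts
  else
    let full_text := PySem.Str.join "" ((parts.filter (fun p => p.1 == "text")).map (fun p => p.2))
    if ¬ (PySem.Str.endswith (PySem.Str.rstrip full_text) (PySem.Str.strip suffix_text) = true) then parts
    else
      let chars_to_remove : Int := PySem.Str.len (PySem.Str.strip suffix_text)
      let res := parts.reverse.foldl pvStepA (chars_to_remove, ([] : List (String × String)))
      res.2.reverse  -- new_parts[::-1] (List.slice?_none_none_neg_one: [::-1] is reverse)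

-- ===== PORT B =====
-- B-side helper: scan the reversed parts list, consuming `rem` suffix characters from
-- rstripped text parts; first position whose rstripped length reaches rem is the boundary.
def pvFindBoundary : List (String × String) → Int → Option (Nat × Int)
  | [], _ => none
  | p :: rest, rem =>
    if p.1 = "text" then
      let L := PySem.Str.len (PySem.Str.rstrip p.2)
      if rem ≤ L then some (0, rem)
      else (pvFindBoundary rest (rem - L)).map (fun kr => (kr.1 + 1, kr.2))
    else (pvFindBoundary rest rem).map (fun kr => (kr.1 + 1, kr.2))

def strip_suffix_from_parts_alt (parts : List (String × String)) (suffix_text : String) : List (String × String) :=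
  if parts = [] ∨ suffix_text = "" then parts
  else
    let full_text := PySem.Str.join "" ((parts.filter (fun p => p.1 == "text")).map (fun p => p.2))
    let target := PySem.Str.strip suffix_text
    if ¬ (PySem.Str.endswith (PySem.Str.rstrip full_text) target = true) then parts
    else
      let rem := PySem.Str.len target
      if rem = 0 then parts
      else
        match pvFindBoundary parts.reverse rem with
        | none => parts.filter (fun p => !(p.1 == "text"))
        | some (k, r) =>
          let idx : Nat := parts.length - 1 - k
          let head := PySem.List.slice parts none (some (idx : Int))       -- parts[:idx]
          let pb := PySem.List.pyGetD parts (idx : Int) ("", "")           -- parts[idx]; idx is in range whenever the boundary was found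
          let sliced := PySem.Str.slice pb.2 none (some (-r))              -- v[:-r]
          let mid := if sliced ≠ "" then [(pb.1, sliced)] else []
          let tail_kept := (PySem.List.slice parts (some ((idx : Int) + 1)) none).filter (fun p => !(p.1 == "text"))  -- parts[idx+1:]
          head ++ mid ++ tail_kept

-- ===== PRECONDITION & SPEC =====
def Spec_strip_suffix_from_parts (parts : List (String × String)) (suffix_text : String) (out : List (String × String)) : Prop := out = strip_suffix_from_parts_alt parts suffix_text
instance (parts : List (String × String)) (suffix_text : String) (out : List (String × String)) : Decidable (Spec_strip_suffix_from_parts parts suffix_text out) := by unfold Spec_strip_suffix_from_parts; infer_instance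

-- ===== CLAIM (what is proved, stated in full; the proofs are below) =====
def Claim_equal_strip_suffix_from_parts : Prop := ∀ (parts : List (String × String)) (suffix_text : String), Dom_strip_suffix_from_parts parts suffix_text → Spec_strip_suffix_from_parts parts suffix_text (strip_suffix_from_parts parts suffix_text)

-- ===== LEMMAS AND PROOFS =====

-- What A's loop emits, in processing (reversed) order.
def pvRunA : Int → List (String × String) → List (String × String)
  | _, [] => []
  | rem, p :: t =>
    if 0 < rem ∧ p.1 = "text" then
      if rem ≤ PySem.Str.len (PySem.Str.rstrip p.2) then
        (if PySem.Str.slice p.2 none (some (-rem)) ≠ "" then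
          [(p.1, PySem.Str.slice p.2 none (some (-rem)))] else []) ++ pvRunA 0 t
      else pvRunA (rem - PySem.Str.len (PySem.Str.rstrip p.2)) t
    else p :: pvRunA rem t

theorem pvFoldA_eq (rs : List (String × String)) : ∀ (rem : Int) (acc : List (String × String)),
    (rs.foldl pvStepA (rem, acc)).2 = acc ++ pvRunA rem rs := by
  induction rs with
  | nil => intro rem acc; simp [pvRunA]
  | cons p t ih =>
    intro rem acc
    simp only [List.foldl_cons, pvStepA, pvRunA]
    split_ifs with h h2 h3 <;> simp [ih]

theorem pvRunA_zero (t : List (String × String)) : pvRunA 0 t = t := by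
  induction t with
  | nil => rfl
  | cons p t ih => simp [pvRunA, ih]

theorem pvFindBoundary_lt (rs : List (String × String)) : ∀ (rem : Int) (k : Nat) (r : Int),
    pvFindBoundary rs rem = some (k, r) → k < rs.length := by
  induction rs with
  | nil => intro rem k r h; simp [pvFindBoundary] at h
  | cons p t ih =>
    intro rem k r h
    simp only [pvFindBoundary] at h
    by_cases hp : p.1 = "text"
    · simp only [if_pos hp] at h
      by_cases h2 : rem ≤ PySem.Str.len (PySem.Str.rstrip p.2)
      · simp only [if_pos h2, Option.some.injEq, Prod.mk.injEq] at h
        simp; omega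
      · simp only [if_neg h2, Option.map_eq_some_iff] at h
        obtain ⟨⟨k', r'⟩, hf, he⟩ := h
        have := ih _ _ _ hf
        simp only [Prod.mk.injEq] at he
        simp
        omega
    · simp only [if_neg hp, Option.map_eq_some_iff] at h
      obtain ⟨⟨k', r'⟩, hf, he⟩ := h
      have := ih _ _ _ hf
      simp only [Prod.mk.injEq] at he
      simp
      omega

-- The shape of A's (reversed) loop output, phrased over the scanned (reversed) list rs.
theorem pvRunA_reverse (rs : List (String × String)) : ∀ (rem : Int), 0 < rem →
    (pvRunA rem rs).reverse =
      match pvFindBoundary rs rem with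
      | none => rs.reverse.filter (fun p => !(p.1 == "text"))
      | some (k, r) =>
          (rs.drop (k + 1)).reverse
          ++ (if PySem.Str.slice (rs.getD k ("", "")).2 none (some (-r)) ≠ "" then
                [((rs.getD k ("", "")).1, PySem.Str.slice (rs.getD k ("", "")).2 none (some (-r)))]
              else [])
          ++ (rs.take k).reverse.filter (fun p => !(p.1 == "text")) := by
  induction rs with
  | nil => intro rem _; simp [pvRunA, pvFindBoundary]
  | cons p t ih =>
    intro rem hrem
    have hcond : (0 < rem) = True := by simp [hrem]
    simp only [pvRunA, pvFindBoundary, hcond, true_and]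
    by_cases hp : p.1 = "text"
    · simp only [if_pos hp]
      by_cases h2 : rem ≤ PySem.Str.len (PySem.Str.rstrip p.2)
      · simp only [if_pos h2]
        by_cases h3 : PySem.Str.slice p.2 none (some (-rem)) ≠ ""
        · simp [h3, pvRunA_zero]
        · simp [h3, pvRunA_zero]
      · simp only [if_neg h2]
        have hpos : 0 < rem - PySem.Str.len (PySem.Str.rstrip p.2) := by
          have : 0 ≤ PySem.Str.len (PySem.Str.rstrip p.2) := by
            rw [PySem.Str.len_eq]; positivity
          omega
        rw [ih _ hpos]
        cases hf : pvFindBoundary t (rem - PySem.Str.len (PySem.Str.rstrip p.2)) with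
        | none => simp [hp]
        | some kr =>
          obtain ⟨k, r⟩ := kr
          simp [hp, List.filter_append, List.append_assoc]
    · simp only [if_neg hp]
      rw [List.reverse_cons, ih _ hrem]
      cases hf : pvFindBoundary t rem with
      | none => simp [hp]
      | some kr =>
        obtain ⟨k, r⟩ := kr
        simp [hp, List.filter_append, List.append_assoc]

-- ===== VERDICT (by name: the statement is the Claim_ definition above) =====
set_option maxHeartbeats 800000 in
theorem strip_suffix_from_parts_spec : Claim_equal_strip_suffix_from_parts := by
  intro parts suffix_text _
  unfold Spec_strip_suffix_from_parts strip_suffix_from_parts strip_suffix_from_parts_alt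
  by_cases hg : parts = [] ∨ suffix_text = ""
  · rw [if_pos hg, if_pos hg]
  · rw [if_neg hg, if_neg hg]
    simp only
    by_cases he : PySem.Str.endswith
        (PySem.Str.rstrip (PySem.Str.join "" ((parts.filter (fun p => p.1 == "text")).map (fun p => p.2))))
        (PySem.Str.strip suffix_text) = true
    · rw [if_neg (not_not_intro he), if_neg (not_not_intro he)]
      rw [pvFoldA_eq]
      by_cases hz : PySem.Str.len (PySem.Str.strip suffix_text) = 0
      · rw [if_pos hz, hz, pvRunA_zero]
        simp only [List.nil_append, List.reverse_reverse]
      · have hrem0 : 0 ≤ PySem.Str.len (PySem.Str.strip suffix_text) := by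
          rw [PySem.Str.len_eq]; positivity
        have hpos : 0 < PySem.Str.len (PySem.Str.strip suffix_text) := by omega
        rw [if_neg hz, List.nil_append, pvRunA_reverse parts.reverse _ hpos]
        cases hf : pvFindBoundary parts.reverse (PySem.Str.len (PySem.Str.strip suffix_text)) with
        | none => simp only [List.reverse_reverse]
        | some kr =>
          obtain ⟨k, r⟩ := kr
          have hk : k < parts.length := by
            have := pvFindBoundary_lt parts.reverse _ k r hf
            simpa using this
          simp only
          rw [PySem.List.slice_to_natCast]
          have hc : ((parts.length - 1 - k : Nat) : Int) + 1 = (((parts.length - 1 - k) + 1 : Nat) : Int) := by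
            push_cast; ring
          rw [hc, PySem.List.slice_from_natCast, PySem.List.pyGetD_natCast]
          have e1 : (parts.reverse.drop (k + 1)).reverse = parts.take (parts.length - 1 - k) := by
            rw [List.reverse_drop]
            simp only [List.reverse_reverse, List.length_reverse]
            congr 1
            omega
          have e3 : (parts.reverse.take k).reverse = parts.drop (parts.length - 1 - k + 1) := by
            rw [List.reverse_take]
            simp only [List.reverse_reverse, List.length_reverse]
            congr 1
            omega
          have e2 : parts.reverse.getD k ("", "") = parts.getD (parts.length - 1 - k) ("", "") := by
            rw [List.getD_eq_getElem _ _ (by simpa using hk), List.getD_eq_getElem _ _ (by omega),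
              List.getElem_reverse]
          rw [e1, e3, e2]
    · rw [if_pos he, if_pos he]
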